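-- pv_equiv track=rewrite | github.com/Nriver/Episode-ReName | EpisodeReName.py | fix_ext
-- ===== SOURCE A (Python) =====
-- COMMON_CAPTION_EXTS = [
--     'srt',
--     'ass',
--     'ssa',
--     'sub',
--     'smi',
-- ]
--
-- def fix_ext(ext):
--     # 文件扩展名修正
--     # 1.统一小写
--     # 2.字幕文件 把sc替换成chs, tc替换成cht, jap替换成jpn
--     new_ext = ext.lower()
--
--     # 双重生成器
--     ori_list = [f'{y}.{x}' for x in COMMON_CAPTION_EXTS for y in ['sc', 'tc', 'jap']]
--     new_list = [f'{y}.{x}' for x in COMMON_CAPTION_EXTS for y in ['chs', 'cht', 'jpn']]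
--
--     for i, x in enumerate(ori_list):
--         if new_ext == x:
--             new_ext = new_list[i]
--             break
--
--     return new_ext
-- ===== SOURCE B (Python) =====
-- COMMON_CAPTION_EXTS = [
--     'srt',
--     'ass',
--     'ssa',
--     'sub',
--     'smi',
-- ]
--
-- LANG_MAP = {'sc': 'chs', 'tc': 'cht', 'jap': 'jpn'}
--
-- def fix_ext(ext):
--     # parse the extension into (lang, rest) at the first dot and look each
--     # piece up separately, instead of matching against 15 precomputed strings
--     low = ext.lower()
--     lang, sep, rest = low.partition('.')
--     if sep and rest in COMMON_CAPTION_EXTS and lang in LANG_MAP: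
--         return f'{LANG_MAP[lang]}.{rest}'
--     return low
-- ===== Notes on version B (the rewrite author's own statement) =====
-- stated objective: simpler
-- what changed: B parses the lowercased extension once into (lang, rest) at the first dot and looks each field up separately (lang in a 3-entry map, rest in the caption-extension list), instead of generating all 15 lang.ext combination strings and linearly scanning them for a whole-string match.
import Mathlib
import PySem

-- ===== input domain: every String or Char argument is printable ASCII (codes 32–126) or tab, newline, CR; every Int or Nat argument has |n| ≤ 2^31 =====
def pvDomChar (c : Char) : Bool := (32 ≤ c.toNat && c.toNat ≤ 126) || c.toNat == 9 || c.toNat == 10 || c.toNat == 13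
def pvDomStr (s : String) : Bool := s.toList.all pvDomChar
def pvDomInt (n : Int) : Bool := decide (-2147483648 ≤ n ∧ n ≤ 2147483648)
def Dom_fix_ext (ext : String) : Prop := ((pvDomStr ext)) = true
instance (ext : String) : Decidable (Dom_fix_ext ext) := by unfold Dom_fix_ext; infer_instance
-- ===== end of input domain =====

-- B parses the lowercased extension once at its first dot and looks the two fields up
-- separately, instead of scanning 15 precomputed "lang.ext" strings (objective: simpler).

-- ===== PORT A =====
def commonCaptionExts : List (List Char) :=
  ["srt".toList, "ass".toList, "ssa".toList, "sub".toList, "smi".toList]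

-- ori_list = [f'{y}.{x}' for x in COMMON_CAPTION_EXTS for y in ['sc', 'tc', 'jap']]
def oriList : List (List Char) :=
  commonCaptionExts.flatMap (fun x => (["sc".toList, "tc".toList, "jap".toList]).map (fun y => y ++ '.' :: x))

def newListA : List (List Char) :=
  commonCaptionExts.flatMap (fun x => (["chs".toList, "cht".toList, "jpn".toList]).map (fun y => y ++ '.' :: x))

-- the 'for i, x in enumerate(ori_list): if new_ext == x: new_ext = new_list[i]; break' loop
def fixLoop (newExt : List Char) (nl : List (List Char)) : List (Int × List Char) → List Char
  | [] => newExt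
  | (i, x) :: rest => if newExt = x then PySem.List.pyGetD nl i [] else fixLoop newExt nl rest

def fix_ext (ext : String) : String :=
  String.ofList (fixLoop (PySem.Chars.lower ext.toList) newListA (PySem.List.enumerate oriList 0))

-- ===== PORT B =====
def langMap : List (List Char × List Char) :=
  [("sc".toList, "chs".toList), ("tc".toList, "cht".toList), ("jap".toList, "jpn".toList)]

-- low.partition('.')  =  (takeWhile (≠'.'), first '.', dropWhile tail); hand port, exact
def fixExtAltCore (low : List Char) : List Char :=
  match low.dropWhile (· ≠ '.') with
  | [] => low
  | _ :: rest =>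
    if commonCaptionExts.contains rest then
      match List.lookup (low.takeWhile (· ≠ '.')) langMap with
      | some m => m ++ '.' :: rest
      | none => low
    else low

def fix_ext_alt (ext : String) : String :=
  String.ofList (fixExtAltCore (PySem.Chars.lower ext.toList))

-- ===== PRECONDITION & SPEC =====
def Spec_fix_ext (ext : String) (out : String) : Prop := out = fix_ext_alt ext
instance (ext : String) (out : String) : Decidable (Spec_fix_ext ext out) := by unfold Spec_fix_ext; infer_instance

-- ===== CLAIM (what is proved, stated in full; the proofs are below) =====
def Claim_equal_fix_ext : Prop := ∀ (ext : String), Dom_fix_ext ext → Spec_fix_ext ext (fix_ext ext)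

-- ===== LEMMAS AND PROOFS =====

-- if l differs from every candidate string, the scan leaves new_ext unchanged
theorem fixLoop_of_ne (l : List Char) (nl : List (List Char)) :
    ∀ es : List (Int × List Char), (∀ q ∈ es, l ≠ q.2) → fixLoop l nl es = l := by
  intro es
  induction es with
  | nil => intro _; rfl
  | cons q rest ih =>
    intro h
    obtain ⟨i, x⟩ := q
    simp only [fixLoop]
    rw [if_neg (h (i, x) (List.mem_cons_self))]
    exact ih fun q hq => h q (List.mem_cons_of_mem _ hq)

-- uniqueness of the first-dot decomposition
theorem split_unique : ∀ (p y rest x : List Char), '.' ∉ p → '.' ∉ y →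
    p ++ '.' :: rest = y ++ '.' :: x → p = y ∧ rest = x := by
  intro p
  induction p with
  | nil =>
    intro y rest x _ hy h
    cases y with
    | nil => simpa using h
    | cons d y' =>
      simp only [List.nil_append, List.cons_append, List.cons.injEq] at h
      exact absurd (h.1 ▸ List.mem_cons_self) hy
  | cons c p' ih =>
    intro y rest x hp hy h
    cases y with
    | nil =>
      simp only [List.cons_append, List.nil_append, List.cons.injEq] at h
      exact absurd (h.1 ▸ List.mem_cons_self) hp
    | cons d y' =>
      simp only [List.cons_append, List.cons.injEq] at h
      have hp' : '.' ∉ p' := fun hm => hp (List.mem_cons_of_mem _ hm)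
      have hy' : '.' ∉ y' := fun hm => hy (List.mem_cons_of_mem _ hm)
      obtain ⟨h1, h2⟩ := ih y' rest x hp' hy' h.2
      exact ⟨by rw [h.1, h1], h2⟩

-- every candidate is lang ++ '.' ++ ext with lang among the three codes and ext a caption ext
theorem oriList_shape : ∀ o ∈ oriList, ∃ y ∈ ["sc".toList, "tc".toList, "jap".toList],
    ∃ x ∈ commonCaptionExts, o = y ++ '.' :: x := by decide

-- each language code is dot-free and a key of langMap
theorem lang_props : ∀ y ∈ ["sc".toList, "tc".toList, "jap".toList],
    '.' ∉ y ∧ (List.lookup y langMap).isSome = true := by decide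

theorem head_of_dropWhile_ne_dot (l : List Char) (c : Char) (rest : List Char)
    (h : l.dropWhile (· ≠ '.') = c :: rest) : c = '.' := by
  induction l with
  | nil => simp at h
  | cons a l' ih =>
    rw [List.dropWhile_cons] at h
    split at h
    · exact ih h
    · next hp => cases h; simpa using hp

theorem mem_snd_of_mem_enumerate {α : Type} (xs : List α) (s : Int) (q : Int × α)
    (h : q ∈ PySem.List.enumerate xs s) : q.2 ∈ xs := by
  have := List.mem_map_of_mem (f := (·.2)) h
  rwa [PySem.List.map_snd_enumerate] at this

-- the heart: on the lowered string both programs agree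
theorem core (l : List Char) :
    fixLoop l newListA (PySem.List.enumerate oriList 0) = fixExtAltCore l := by
  cases hq : l.dropWhile (· ≠ '.') with
  | nil =>
    have hno : '.' ∉ l := by
      intro hm
      have := (List.dropWhile_eq_nil_iff.mp hq) _ hm
      simp at this
    simp only [fixExtAltCore, hq]
    refine fixLoop_of_ne l _ _ ?_
    intro q hqmem heq
    obtain ⟨y, _, x, _, hshape⟩ := oriList_shape _ (mem_snd_of_mem_enumerate _ _ _ hqmem)
    exact hno (heq ▸ hshape ▸ List.mem_append_right y List.mem_cons_self)
  | cons c rest =>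
    have hc : c = '.' := head_of_dropWhile_ne_dot l c rest hq
    subst hc
    have hl : l = l.takeWhile (· ≠ '.') ++ '.' :: rest := by
      conv_lhs => rw [← List.takeWhile_append_dropWhile (p := fun c => decide (c ≠ '.')) (l := l)]
      rw [hq]
    have hp : '.' ∉ l.takeWhile (· ≠ '.') := by
      intro hm
      have := List.mem_takeWhile_imp hm
      simp at this
    simp only [fixExtAltCore, hq]
    by_cases hrest : rest ∈ commonCaptionExts
    · cases hlk : List.lookup (l.takeWhile (· ≠ '.')) langMap with
      | none =>
        rw [if_pos (by simpa using hrest)]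
        refine fixLoop_of_ne l _ _ ?_
        intro q hqmem heq
        obtain ⟨y, hymem, x, _, hshape⟩ := oriList_shape _ (mem_snd_of_mem_enumerate _ _ _ hqmem)
        obtain ⟨hy, hkey⟩ := lang_props y hymem
        have h2 := split_unique _ _ _ _ hp hy (by rw [← hl, heq, hshape])
        rw [← h2.1, hlk] at hkey
        simp at hkey
      | some m =>
        rw [if_pos (by simpa using hrest)]
        -- the lookup pins lang to one of three literals, membership pins rest to one of five;
        -- each of the fifteen concrete strings is settled by computation
        have hkey : (l.takeWhile (· ≠ '.') = "sc".toList ∧ m = "chs".toList) ∨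
            (l.takeWhile (· ≠ '.') = "tc".toList ∧ m = "cht".toList) ∨
            (l.takeWhile (· ≠ '.') = "jap".toList ∧ m = "jpn".toList) := by
          simp only [langMap, List.lookup] at hlk
          split at hlk
          · next hb => exact Or.inl ⟨eq_of_beq hb, by simpa using hlk.symm⟩
          · split at hlk
            · next hb => exact Or.inr (Or.inl ⟨eq_of_beq hb, by simpa using hlk.symm⟩)
            · split at hlk
              · next hb => exact Or.inr (Or.inr ⟨eq_of_beq hb, by simpa using hlk.symm⟩)
              · simp at hlk
        have hrest' : rest = "srt".toList ∨ rest = "ass".toList ∨ rest = "ssa".toList ∨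
            rest = "sub".toList ∨ rest = "smi".toList := by
          simpa [commonCaptionExts] using hrest
        rw [hl]
        rcases hkey with ⟨h, hm⟩ | ⟨h, hm⟩ | ⟨h, hm⟩ <;> rw [h, hm] <;>
          rcases hrest' with h' | h' | h' | h' | h' <;> rw [h'] <;> decide
    · rw [if_neg (by simpa using hrest)]
      refine fixLoop_of_ne l _ _ ?_
      intro q hqmem heq
      obtain ⟨y, hymem, x, hx, hshape⟩ := oriList_shape _ (mem_snd_of_mem_enumerate _ _ _ hqmem)
      obtain ⟨hy, _⟩ := lang_props y hymem
      have h2 := split_unique _ _ _ _ hp hy (by rw [← hl, heq, hshape])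
      exact hrest (h2.2 ▸ hx)

-- ===== VERDICT (by name: the statement is the Claim_ definition above) =====
theorem fix_ext_spec : Claim_equal_fix_ext := by
  intro ext _
  unfold Spec_fix_ext fix_ext fix_ext_alt
  rw [core]
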